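-- pv_equiv track=rewrite | github.com/julienr/advent_of_code | 2021/12/main2.py | has_small_visited_twice
-- ===== SOURCE A (Python) =====
-- from collections import defaultdict, Counter
--
-- def is_big(cave):
--     return cave.isupper()
--
-- def has_small_visited_twice(visited):
--     counts = Counter(visited)
--     for key, count in counts.items():
--         if is_big(key):
--             continue
--         if key == 'start' or key == 'end':
--             continue
--         if count >= 2:
--             return True
--     return False
-- ===== SOURCE B (Python) =====
-- def has_small_visited_twice(visited):
--     seen = set()
--     for cave in visited:
--         if cave.isupper() or cave == 'start' or cave == 'end':
--             continue
--         if cave in seen: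
--             return True
--         seen.add(cave)
--     return False
-- ===== Notes on version B (the rewrite author's own statement) =====
-- stated objective: simpler
-- what changed: A builds a full Counter of visited and then scans its keys; B makes one early-exit pass over visited, keeping a set of small caves already seen and returning True at the first repeat.
import Mathlib
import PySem

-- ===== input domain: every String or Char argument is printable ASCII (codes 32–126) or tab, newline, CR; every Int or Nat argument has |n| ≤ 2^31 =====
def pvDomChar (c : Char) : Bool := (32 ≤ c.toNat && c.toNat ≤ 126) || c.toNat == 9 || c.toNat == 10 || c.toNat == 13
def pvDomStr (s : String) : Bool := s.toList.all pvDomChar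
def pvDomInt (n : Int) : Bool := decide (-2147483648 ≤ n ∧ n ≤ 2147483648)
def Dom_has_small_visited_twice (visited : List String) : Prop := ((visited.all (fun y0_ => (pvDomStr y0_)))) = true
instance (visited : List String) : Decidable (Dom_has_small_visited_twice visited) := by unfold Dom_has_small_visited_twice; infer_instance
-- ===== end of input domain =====

-- B replaces A's build-Counter-then-scan-keys with a single early-exit pass over
-- `visited` keeping a set of small caves already seen (objective: simpler).


-- ===== PORT A =====
-- hand port of Python str.isupper(): some cased character and no lowercase one;
-- exact on the ASCII domain, where the cased characters are exactly A-Z and a-z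
def pyStrIsupper (s : String) : Bool :=
  s.toList.any (fun c => PySem.Chars.isupper c) && s.toList.all (fun c => !PySem.Chars.islower c)

def is_big (cave : String) : Bool := pyStrIsupper cave

def hsvtLoopA : List (String × Int) → Bool
  | [] => false
  | (key, count) :: rest =>
    if is_big key then hsvtLoopA rest
    else if key == "start" || key == "end" then hsvtLoopA rest
    else if 2 ≤ count then true
    else hsvtLoopA rest

def has_small_visited_twice (visited : List String) : Bool :=
  hsvtLoopA (PySem.Dict.counter visited).items

-- ===== PORT B =====
def hsvtLoopB : List String → PySem.Set String → Bool
  | [], _ => false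
  | cave :: rest, seen =>
    if pyStrIsupper cave || cave == "start" || cave == "end" then hsvtLoopB rest seen
    else if PySem.Set.contains seen cave then true
    else hsvtLoopB rest (PySem.Set.add seen cave)

def has_small_visited_twice_alt (visited : List String) : Bool :=
  hsvtLoopB visited PySem.Set.empty

-- ===== PRECONDITION & SPEC =====
def Spec_has_small_visited_twice (visited : List String) (out : Bool) : Prop := out = has_small_visited_twice_alt visited
instance (visited : List String) (out : Bool) : Decidable (Spec_has_small_visited_twice visited out) := by unfold Spec_has_small_visited_twice; infer_instance

-- ===== CLAIM (what is proved, stated in full; the proofs are below) =====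
def Claim_equal_has_small_visited_twice : Prop := ∀ (visited : List String), Dom_has_small_visited_twice visited → Spec_has_small_visited_twice visited (has_small_visited_twice visited)


-- ===== LEMMAS AND PROOFS =====

-- a cave both loops skip: big, or one of the endpoints (proof-only helper)
def pvSkip (c : String) : Bool := pyStrIsupper c || c == "start" || c == "end"

theorem count_cons_aux (x c : String) (rest : List String) :
    (c :: rest).count x = rest.count x + (if c = x then 1 else 0) := by
  simp [List.count_cons]

theorem hsvtLoopA_eq_any : ∀ (items : List (String × Int)),
    hsvtLoopA items = items.any (fun p => !pvSkip p.1 && decide ((2:Int) ≤ p.2))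
  | [] => rfl
  | (key, count) :: rest => by
    rw [List.any_cons, ← hsvtLoopA_eq_any rest]
    show (if is_big key then hsvtLoopA rest
          else if (key == "start" || key == "end") then hsvtLoopA rest
          else if (2:Int) ≤ count then true else hsvtLoopA rest) = _
    split_ifs with h1 h2 h3
    · have hsk : pvSkip key = true := by
        simp [pvSkip, show pyStrIsupper key = true from h1]
      simp [hsk]
    · have hsk : pvSkip key = true := by
        simp only [pvSkip, Bool.or_assoc, h2, Bool.or_true]
      simp [hsk]
    · have e1 : pyStrIsupper key = false := Bool.not_eq_true _ |>.mp h1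
      have e2 : (key == "start" || key == "end") = false := Bool.not_eq_true _ |>.mp h2
      have hsk : pvSkip key = false := by
        simp only [pvSkip, Bool.or_assoc, e2, Bool.or_false, e1]
      simp [hsk, h3]
    · simp [h3]

theorem hsvtLoopB_iff (l : List String) : ∀ (seen : PySem.Set String),
    hsvtLoopB l seen = true ↔
      ∃ c ∈ l, pvSkip c = false ∧ (c ∈ seen ∨ 2 ≤ l.count c) := by
  induction l with
  | nil => intro seen; simp [hsvtLoopB]
  | cons c rest ih =>
    intro seen
    by_cases hk : pvSkip c = true
    · have hstep : hsvtLoopB (c :: rest) seen = hsvtLoopB rest seen := by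
        simp [hsvtLoopB, show (pyStrIsupper c || c == "start" || c == "end") = true from hk]
      rw [hstep, ih]
      constructor
      · rintro ⟨x, hx, hsx, h⟩
        refine ⟨x, List.mem_cons_of_mem _ hx, hsx, ?_⟩
        rcases h with h | h
        · exact Or.inl h
        · right; rw [count_cons_aux]
          by_cases e : c = x
          · rw [if_pos e]; omega
          · rw [if_neg e]; omega
      · rintro ⟨x, hx, hsx, h⟩
        rcases List.mem_cons.mp hx with hxc | hx'
        · subst hxc; rw [hsx] at hk; cases hk
        · have hne : ¬ (c = x) := by
            intro e; subst e; rw [hsx] at hk; cases hk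
          refine ⟨x, hx', hsx, ?_⟩
          rcases h with h | h
          · exact Or.inl h
          · rw [count_cons_aux, if_neg hne] at h
            right; omega
    · have hk' : pvSkip c = false := Bool.not_eq_true _ |>.mp hk
      have hstep : hsvtLoopB (c :: rest) seen =
          (if PySem.Set.contains seen c then true else hsvtLoopB rest (PySem.Set.add seen c)) := by
        simp [hsvtLoopB, show (pyStrIsupper c || c == "start" || c == "end") = false from hk']
      rw [hstep]
      by_cases hmem : PySem.Set.contains seen c = true
      · rw [if_pos hmem]
        constructor
        · intro _
          exact ⟨c, by simp, hk', Or.inl (by simpa [PySem.Set.contains] using hmem)⟩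
        · intro _; rfl
      · rw [if_neg hmem, ih]
        have hcnotin : c ∉ seen := fun hin => hmem (by simpa [PySem.Set.contains] using hin)
        constructor
        · rintro ⟨x, hx, hsx, h⟩
          rcases h with h | h
          · rcases (by simpa [PySem.Set.mem_add] using h : x ∈ seen ∨ x = c) with h' | hxc
            · exact ⟨x, List.mem_cons_of_mem _ hx, hsx, Or.inl h'⟩
            · subst hxc
              refine ⟨x, by simp, hsx, Or.inr ?_⟩
              rw [count_cons_aux, if_pos rfl]
              have : 0 < rest.count x := List.count_pos_iff.mpr hx
              omega
          · refine ⟨x, List.mem_cons_of_mem _ hx, hsx, Or.inr ?_⟩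
            rw [count_cons_aux]
            by_cases e : c = x
            · rw [if_pos e]; omega
            · rw [if_neg e]; omega
        · rintro ⟨x, hx, hsx, h⟩
          rcases List.mem_cons.mp hx with hxc | hx'
          · subst hxc
            rcases h with h | h
            · exact absurd h hcnotin
            · rw [count_cons_aux, if_pos rfl] at h
              have hxmem : x ∈ rest := List.count_pos_iff.mp (by omega)
              exact ⟨x, hxmem, hsx, Or.inl (by simp [PySem.Set.mem_add])⟩
          · by_cases e : c = x
            · subst e
              exact ⟨c, hx', hsx, Or.inl (by simp [PySem.Set.mem_add])⟩
            · refine ⟨x, hx', hsx, ?_⟩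
              rcases h with h | h
              · exact Or.inl (by simp [PySem.Set.mem_add, h])
              · rw [count_cons_aux, if_neg e] at h
                exact Or.inr (by omega)

theorem hsvt_A_iff (visited : List String) :
    has_small_visited_twice visited = true ↔
      ∃ c ∈ visited, pvSkip c = false ∧ 2 ≤ visited.count c := by
  rw [has_small_visited_twice, hsvtLoopA_eq_any, PySem.Dict.items_counter, List.any_map,
    List.any_eq_true]
  constructor
  · rintro ⟨k, hk, hcond⟩
    simp only [Function.comp, Bool.and_eq_true, Bool.not_eq_eq_eq_not, Bool.not_true,
      decide_eq_true_eq] at hcond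
    refine ⟨k, ?_, hcond.1, by exact_mod_cast hcond.2⟩
    simpa [PySem.Set.mem_ofList] using hk
  · rintro ⟨c, hc, hs, hcount⟩
    refine ⟨c, by simpa [PySem.Set.mem_ofList] using hc, ?_⟩
    simp only [Function.comp, Bool.and_eq_true, Bool.not_eq_eq_eq_not, Bool.not_true,
      decide_eq_true_eq]
    exact ⟨hs, by exact_mod_cast hcount⟩

theorem hsvt_B_iff (visited : List String) :
    has_small_visited_twice_alt visited = true ↔
      ∃ c ∈ visited, pvSkip c = false ∧ 2 ≤ visited.count c := by
  rw [has_small_visited_twice_alt, hsvtLoopB_iff]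
  simp [PySem.Set.empty]

-- ===== VERDICT (by name: the statement is the Claim_ definition above) =====
theorem has_small_visited_twice_spec : Claim_equal_has_small_visited_twice := by
  intro visited _
  unfold Spec_has_small_visited_twice
  have h := (hsvt_A_iff visited).trans (hsvt_B_iff visited).symm
  cases hA : has_small_visited_twice visited <;>
    cases hB : has_small_visited_twice_alt visited <;> simp_all
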